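-- pv_equiv track=rewrite | github.com/aerovfx/teamteenteen | APPENDIX_A/Python/PythonChallenge/Level3/de34/DAYSONV5.PY | sap_xep_va_gom_so
-- ===== SOURCE A (Python) =====
-- def sap_xep_va_gom_so(A):
--     nums_divisible_by_7 = []
--     nums_divisible_by_5 = []
--     other_nums = []
--
--     for num in A:
--         if num % 7 == 0:
--             nums_divisible_by_7.append(num)
--         elif num % 5 == 0:
--             nums_divisible_by_5.append(num)
--         else:
--             other_nums.append(num)
--
--     sorted_nums = sorted(nums_divisible_by_7) + sorted(other_nums) + sorted(nums_divisible_by_5)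
--     return sorted_nums
-- ===== SOURCE B (Python) =====
-- def sap_xep_va_gom_so(A):
--     return sorted(A, key=lambda x: (0 if x % 7 == 0 else 2 if x % 5 == 0 else 1, x))
-- ===== Notes on version B (the rewrite author's own statement) =====
-- stated objective: simpler
-- what changed: Replaced the three-way partition loop plus three separate sorts and a concatenation by one stable sort with a composite key (group rank, value), where the group rank reproduces the if/elif precedence (multiples of 35 rank with the 7-group).
import Mathlib
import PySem

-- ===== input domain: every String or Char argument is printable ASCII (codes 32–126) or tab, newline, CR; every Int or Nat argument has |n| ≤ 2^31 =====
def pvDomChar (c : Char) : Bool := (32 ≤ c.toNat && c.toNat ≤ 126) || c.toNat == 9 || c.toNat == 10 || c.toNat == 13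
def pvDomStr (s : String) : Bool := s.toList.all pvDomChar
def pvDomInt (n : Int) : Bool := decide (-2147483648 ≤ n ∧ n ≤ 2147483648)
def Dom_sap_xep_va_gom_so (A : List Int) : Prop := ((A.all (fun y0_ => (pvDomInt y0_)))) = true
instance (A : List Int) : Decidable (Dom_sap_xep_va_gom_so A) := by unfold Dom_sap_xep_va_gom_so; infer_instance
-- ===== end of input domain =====

-- B replaces A's partition-into-three-lists loop and three sorts by a single stable
-- sort with a composite (group rank, value) key; same cost, simpler ('simpler' objective).

-- ===== PORT A =====
-- the for-loop appending to the three buckets, as a foldl over the triple (div7, div5, other)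
def sap_xep_va_gom_so (A : List Int) : List Int :=
  let t := A.foldl
    (fun (acc : List Int × List Int × List Int) num =>
      if PySem.Int.mod num 7 = 0 then (acc.1 ++ [num], acc.2.1, acc.2.2)
      else if PySem.Int.mod num 5 = 0 then (acc.1, acc.2.1 ++ [num], acc.2.2)
      else (acc.1, acc.2.1, acc.2.2 ++ [num]))
    ([], [], [])
  PySem.List.sorted t.1 (fun x => x) ++ PySem.List.sorted t.2.2 (fun x => x)
    ++ PySem.List.sorted t.2.1 (fun x => x)

-- ===== PORT B =====
-- the key lambda: 0 if x % 7 == 0 else 2 if x % 5 == 0 else 1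
def pvGroup (x : Int) : Int :=
  if PySem.Int.mod x 7 = 0 then 0 else if PySem.Int.mod x 5 = 0 then 2 else 1

def sap_xep_va_gom_so_alt (A : List Int) : List Int :=
  PySem.List.sorted2 A pvGroup (fun x => x) false

-- ===== PRECONDITION & SPEC =====
def Spec_sap_xep_va_gom_so (A : List Int) (out : List Int) : Prop := out = sap_xep_va_gom_so_alt A
instance (A : List Int) (out : List Int) : Decidable (Spec_sap_xep_va_gom_so A out) := by unfold Spec_sap_xep_va_gom_so; infer_instance

-- ===== CLAIM (what is proved, stated in full; the proofs are below) =====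
def Claim_equal_sap_xep_va_gom_so : Prop := ∀ (A : List Int), Dom_sap_xep_va_gom_so A → Spec_sap_xep_va_gom_so A (sap_xep_va_gom_so A)

-- ===== LEMMAS AND PROOFS =====

-- the comparison sorted2 uses for the composite key (pvGroup x, x)
def pvLt (a b : Int) : Bool :=
  decide (pvGroup a < pvGroup b) || (!decide (pvGroup b < pvGroup a) && decide (a < b))

-- the three bucket predicates, with the if/elif precedence
def pvP7 (x : Int) : Bool := decide (PySem.Int.mod x 7 = 0)
def pvP5 (x : Int) : Bool := !pvP7 x && decide (PySem.Int.mod x 5 = 0)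
def pvPo (x : Int) : Bool := !pvP7 x && !decide (PySem.Int.mod x 5 = 0)

lemma pv_foldl_partition (A : List Int) (a7 a5 ao : List Int) :
    A.foldl
      (fun (acc : List Int × List Int × List Int) num =>
        if PySem.Int.mod num 7 = 0 then (acc.1 ++ [num], acc.2.1, acc.2.2)
        else if PySem.Int.mod num 5 = 0 then (acc.1, acc.2.1 ++ [num], acc.2.2)
        else (acc.1, acc.2.1, acc.2.2 ++ [num]))
      (a7, a5, ao)
    = (a7 ++ A.filter pvP7, a5 ++ A.filter pvP5, ao ++ A.filter pvPo) := by
  induction A generalizing a7 a5 ao with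
  | nil => simp
  | cons x xs ih =>
    rw [List.foldl_cons]
    by_cases hd7 : (7 : Int) ∣ x
    · rw [if_pos ((PySem.Int.mod_eq_zero_iff_dvd x 7).mpr hd7), ih]
      simp [pvP7, pvP5, pvPo, hd7]
    · rw [if_neg (fun hm => hd7 ((PySem.Int.mod_eq_zero_iff_dvd x 7).mp hm))]
      by_cases hd5 : (5 : Int) ∣ x
      · rw [if_pos ((PySem.Int.mod_eq_zero_iff_dvd x 5).mpr hd5), ih]
        simp [pvP7, pvP5, pvPo, hd7, hd5]
      · rw [if_neg (fun hm => hd5 ((PySem.Int.mod_eq_zero_iff_dvd x 5).mp hm)), ih]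
        simp [pvP7, pvP5, pvPo, hd7, hd5]

lemma pv_insertBy_append_left (before : Int → Int → Bool) (x : Int) (ys zs : List Int)
    (h : ∀ z ∈ zs, before x z = true) :
    PySem.List.insertBy before x (ys ++ zs) = PySem.List.insertBy before x ys ++ zs := by
  induction ys with
  | nil =>
    cases zs with
    | nil => rfl
    | cons z zs' => simp [PySem.List.insertBy, h z (by simp)]
  | cons y ys' ih =>
    by_cases hb : before x y = true
    · simp [PySem.List.insertBy, hb]
    · simp only [List.cons_append, PySem.List.insertBy, eq_false_of_ne_true hb,
        Bool.false_eq_true, if_false, ih]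

lemma pv_insertBy_append_right (before : Int → Int → Bool) (x : Int) (ys zs : List Int)
    (h : ∀ y ∈ ys, before x y = false) :
    PySem.List.insertBy before x (ys ++ zs) = ys ++ PySem.List.insertBy before x zs := by
  induction ys with
  | nil => rfl
  | cons y ys' ih =>
    simp only [List.cons_append, PySem.List.insertBy, h y (by simp),
      Bool.false_eq_true, if_false]
    exact congrArg (y :: ·) (ih (fun y hy => h y (by simp [hy])))

lemma pv_group_p7 {x : Int} (h : pvP7 x = true) : pvGroup x = 0 := by
  simp only [pvP7, decide_eq_true_eq, PySem.Int.mod_eq_zero_iff_dvd] at h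
  simp [pvGroup, h]

lemma pv_group_p5 {x : Int} (h : pvP5 x = true) : pvGroup x = 2 := by
  simp only [pvP5, pvP7, Bool.and_eq_true, Bool.not_eq_true', decide_eq_true_eq,
    decide_eq_false_iff_not, PySem.Int.mod_eq_zero_iff_dvd] at h
  simp [pvGroup, h.1, h.2]

lemma pv_group_po {x : Int} (h : pvPo x = true) : pvGroup x = 1 := by
  simp only [pvPo, pvP7, Bool.and_eq_true, Bool.not_eq_true',
    decide_eq_false_iff_not, PySem.Int.mod_eq_zero_iff_dvd] at h
  simp [pvGroup, h.1, h.2]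

lemma pv_lt_of_group_lt {x z : Int} (h : pvGroup x < pvGroup z) : pvLt x z = true := by
  simp [pvLt, h]

lemma pv_lt_of_group_gt {x z : Int} (h : pvGroup z < pvGroup x) : pvLt x z = false := by
  simp [pvLt, h, not_lt.mpr (le_of_lt h)]

lemma pv_sorted2_eq_foldl (A : List Int) :
    PySem.List.sorted2 A pvGroup (fun x => x) false
      = A.foldl (fun acc x => PySem.List.insertBy pvLt x acc) [] := rfl

lemma pv_lt_in_group {x z : Int} (hg : pvGroup x = pvGroup z) :
    pvLt x z = decide (x < z) := by
  simp [pvLt, hg]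

-- within one bucket pvLt is the plain value comparison, so inserting into a bucket
-- is the insertion step of sorted(bucket)
lemma pv_insertBy_congr_in_group (x : Int) (ys : List Int)
    (h : ∀ y ∈ ys, pvGroup y = pvGroup x) :
    PySem.List.insertBy pvLt x ys
      = PySem.List.insertBy (fun a b => decide (a < b)) x ys := by
  induction ys with
  | nil => rfl
  | cons y ys' ih =>
    have hk : pvLt x y = decide (x < y) := pv_lt_in_group (h y (by simp)).symm
    by_cases hlt : x < y
    · simp [PySem.List.insertBy, hk, hlt]
    · simp only [PySem.List.insertBy, hk, decide_eq_true_eq, if_neg hlt,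
        ih (fun y hy => h y (by simp [hy]))]

lemma pv_sorted_id_snoc (ys : List Int) (x : Int) :
    PySem.List.sorted (ys ++ [x]) (fun v => v) false
      = PySem.List.insertBy (fun a b => decide (a < b)) x
          (PySem.List.sorted ys (fun v => v) false) := by
  simp [PySem.List.sorted, List.foldl_append]

-- main invariant: the composite-key sort is the concatenation of the three bucket sorts
lemma pv_main (A : List Int) :
    PySem.List.sorted2 A pvGroup (fun x => x) false
      = PySem.List.sorted (A.filter pvP7) (fun x => x) false
        ++ PySem.List.sorted (A.filter pvPo) (fun x => x) false
        ++ PySem.List.sorted (A.filter pvP5) (fun x => x) false := by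
  induction A using List.reverseRecOn with
  | nil => rfl
  | append_singleton xs x ih =>
    have hsnoc : PySem.List.sorted2 (xs ++ [x]) pvGroup (fun v => v) false
        = PySem.List.insertBy pvLt x (PySem.List.sorted2 xs pvGroup (fun v => v) false) := by
      simp [pv_sorted2_eq_foldl, List.foldl_append]
    rw [hsnoc, ih]
    set s7 := PySem.List.sorted (xs.filter pvP7) (fun v => v) false with hs7
    set so := PySem.List.sorted (xs.filter pvPo) (fun v => v) false with hso
    set s5 := PySem.List.sorted (xs.filter pvP5) (fun v => v) false with hs5
    have mem7 : ∀ y ∈ s7, pvGroup y = 0 := by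
      intro y hy
      rw [hs7, PySem.List.mem_sorted] at hy
      exact pv_group_p7 (List.of_mem_filter hy)
    have memo : ∀ y ∈ so, pvGroup y = 1 := by
      intro y hy
      rw [hso, PySem.List.mem_sorted] at hy
      exact pv_group_po (List.of_mem_filter hy)
    have mem5 : ∀ y ∈ s5, pvGroup y = 2 := by
      intro y hy
      rw [hs5, PySem.List.mem_sorted] at hy
      exact pv_group_p5 (List.of_mem_filter hy)
    by_cases hd7 : (7 : Int) ∣ x
    · have h7 : pvP7 x = true := by simp [pvP7, hd7]
      have hg : pvGroup x = 0 := pv_group_p7 h7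
      have hfil7 : (xs ++ [x]).filter pvP7 = xs.filter pvP7 ++ [x] := by
        simp [List.filter_append, h7]
      have hfilo : (xs ++ [x]).filter pvPo = xs.filter pvPo := by
        have : pvPo x = false := by simp [pvPo, pvP7, hd7]
        simp [List.filter_append, this]
      have hfil5 : (xs ++ [x]).filter pvP5 = xs.filter pvP5 := by
        have : pvP5 x = false := by simp [pvP5, pvP7, hd7]
        simp [List.filter_append, this]
      rw [hfil7, hfilo, hfil5, pv_sorted_id_snoc, List.append_assoc,
        pv_insertBy_append_left pvLt x s7 (so ++ s5)
          (by intro z hz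
              rcases List.mem_append.mp hz with hz | hz
              · exact pv_lt_of_group_lt (by rw [hg, memo z hz]; norm_num)
              · exact pv_lt_of_group_lt (by rw [hg, mem5 z hz]; norm_num)),
        pv_insertBy_congr_in_group x s7 (fun y hy => by rw [mem7 y hy, hg]),
        ← hs7, ← hso, ← hs5, List.append_assoc]
    · have h7 : ¬ pvP7 x = true := by simp [pvP7, hd7]
      by_cases hd5 : (5 : Int) ∣ x
      · -- bucket 5 (group 2)
        have hp5 : pvP5 x = true := by simp [pvP5, pvP7, hd7, hd5]
        have hg : pvGroup x = 2 := pv_group_p5 hp5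
        have hfil7 : (xs ++ [x]).filter pvP7 = xs.filter pvP7 := by
          simp [List.filter_append, eq_false_of_ne_true h7]
        have hfilo : (xs ++ [x]).filter pvPo = xs.filter pvPo := by
          have : pvPo x = false := by simp [pvPo, pvP7, hd5]
          simp [List.filter_append, this]
        have hfil5 : (xs ++ [x]).filter pvP5 = xs.filter pvP5 ++ [x] := by
          simp [List.filter_append, hp5]
        rw [hfil7, hfilo, hfil5, pv_sorted_id_snoc, List.append_assoc, ← List.append_assoc s7,
          pv_insertBy_append_right pvLt x (s7 ++ so) s5
            (by intro y hy
                rcases List.mem_append.mp hy with hy | hy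
                · exact pv_lt_of_group_gt (by rw [hg, mem7 y hy]; norm_num)
                · exact pv_lt_of_group_gt (by rw [hg, memo y hy]; norm_num)),
          pv_insertBy_congr_in_group x s5 (fun y hy => by rw [mem5 y hy, hg]),
          ← hs7, ← hso, ← hs5, List.append_assoc]
      · -- other bucket (group 1)
        have hpo : pvPo x = true := by simp [pvPo, pvP7, hd7, hd5]
        have hg : pvGroup x = 1 := pv_group_po hpo
        have hfil7 : (xs ++ [x]).filter pvP7 = xs.filter pvP7 := by
          simp [List.filter_append, eq_false_of_ne_true h7]
        have hfilo : (xs ++ [x]).filter pvPo = xs.filter pvPo ++ [x] := by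
          simp [List.filter_append, hpo]
        have hfil5 : (xs ++ [x]).filter pvP5 = xs.filter pvP5 := by
          have : pvP5 x = false := by simp [pvP5, pvP7, hd5]
          simp [List.filter_append, this]
        rw [hfil7, hfilo, hfil5, pv_sorted_id_snoc, List.append_assoc,
          pv_insertBy_append_right pvLt x s7 (so ++ s5)
            (fun y hy => pv_lt_of_group_gt (by rw [hg, mem7 y hy]; norm_num)),
          pv_insertBy_append_left pvLt x so s5
            (fun z hz => pv_lt_of_group_lt (by rw [hg, mem5 z hz]; norm_num)),
          pv_insertBy_congr_in_group x so (fun y hy => by rw [memo y hy, hg]),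
          ← hs7, ← hso, ← hs5, List.append_assoc]

-- ===== VERDICT (by name: the statement is the Claim_ definition above) =====
theorem sap_xep_va_gom_so_spec : Claim_equal_sap_xep_va_gom_so := by
  intro A _
  show sap_xep_va_gom_so A = sap_xep_va_gom_so_alt A
  rw [sap_xep_va_gom_so, sap_xep_va_gom_so_alt, pv_main, pv_foldl_partition A [] [] []]
  simp
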